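-- pv_equiv track=rewrite | github.com/Kshitij-Ambilduke/games_python | 2048.py | final_right
-- ===== SOURCE A (Python) =====
-- def shift_right(grid):
-- 	for row in grid:
-- 		for i in range(len(grid)-1):
-- 			if row[-1-i]==0:
-- 				row[-1-i],row[-2-i]=row[-2-i],row[-1-i]
-- 	return(grid)
--
-- def final_right(grid):
--
-- 	for i in range(len(grid)):
-- 		grid=shift_right(grid)
--
-- 	for row in grid:
-- 		for i in range(len(grid)-1):
-- 			if row[-1-i]==row[-2-i]:
-- 				row[-1-i]=2*row[-1-i]
-- 				row[-2-i]=0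
--
-- 	for i in range(len(grid)):
-- 		grid=shift_right(grid)
-- 	return grid
-- ===== SOURCE B (Python) =====
-- # One pass per row: A's move only ever touches the last len(grid) cells of a row, so keep the
-- # rest, then drop zeros, greedily merge equal neighbours right-to-left, pad zeros on the left.
-- # Note: A mutates its argument's rows in place; B builds a fresh grid (return values agree).
-- def final_right(grid):
--     n = len(grid)
--     res = []
--     for row in grid:
--         keep = row[:max(len(row) - n, 0)]
--         vals = [x for x in row[len(keep):] if x != 0]
--         merged = []
--         i = len(vals) - 1
--         while i >= 0:
--             if i > 0 and vals[i] == vals[i - 1]: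
--                 merged.append(2 * vals[i])
--                 i -= 2
--             else:
--                 merged.append(vals[i])
--                 i -= 1
--         merged.reverse()
--         res.append(keep + [0] * (n - len(merged)) + merged)
--     return res
-- ===== Notes on version B (the rewrite author's own statement) =====
-- stated objective: faster
-- what changed: A repeatedly bubble-shifts the whole grid 2*n times (each a full O(n^2) sweep) around a merge sweep; B handles each row independently in one pass over its last-n-cells window: drop zeros, greedily merge equal neighbours right-to-left, pad with zeros on the left.
-- outside the precondition, e.g. on final_right([[]]): A returns [[]], B returns [[0]]
import Mathlib
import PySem

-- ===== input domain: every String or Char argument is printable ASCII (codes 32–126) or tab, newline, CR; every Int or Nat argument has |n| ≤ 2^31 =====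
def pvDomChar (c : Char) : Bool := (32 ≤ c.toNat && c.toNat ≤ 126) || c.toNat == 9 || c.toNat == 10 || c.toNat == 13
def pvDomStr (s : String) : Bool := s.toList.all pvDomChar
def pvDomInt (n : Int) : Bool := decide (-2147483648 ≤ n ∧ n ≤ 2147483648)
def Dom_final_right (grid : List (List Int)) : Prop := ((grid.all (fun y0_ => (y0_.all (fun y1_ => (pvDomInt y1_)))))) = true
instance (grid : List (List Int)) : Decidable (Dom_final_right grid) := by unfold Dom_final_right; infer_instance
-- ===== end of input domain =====

-- B performs a 2048 right-move per row in one pass (compact, greedy merge, pad) instead of A's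
-- repeated whole-grid bubble shifts; A mutates its argument's rows in place, B builds a fresh
-- grid — the equivalence proved here is about the RETURN value.

-- ===== PORT A =====
-- row[i] = v for a possibly negative Python index; exact for in-range indices
-- (out-of-range indices raise IndexError in Python and are excluded by Pre_).
def pySetAt (row : List Int) (i : Int) (v : Int) : List Int :=
  let j : Int := if i < 0 then i + row.length else i
  if j < 0 then row else row.set j.toNat v

-- body of the inner loop of shift_right: 'if row[-1-i]==0: row[-1-i],row[-2-i]=row[-2-i],row[-1-i]'
def stepShift (row : List Int) (i : Int) : List Int :=
  if PySem.List.pyGetD row (-1-i) 0 = 0 then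
    pySetAt (pySetAt row (-1-i) (PySem.List.pyGetD row (-2-i) 0)) (-2-i) (PySem.List.pyGetD row (-1-i) 0)
  else row

-- helper shift_right of A
def shift_rightA (g : List (List Int)) : List (List Int) :=
  g.map (fun row => (PySem.List.pyRange 0 ((g.length : Int) - 1) 1).foldl stepShift row)

-- body of the merge loop: 'if row[-1-i]==row[-2-i]: row[-1-i]=2*row[-1-i]; row[-2-i]=0'
def stepMerge (row : List Int) (i : Int) : List Int :=
  if PySem.List.pyGetD row (-1-i) 0 = PySem.List.pyGetD row (-2-i) 0 then
    pySetAt (pySetAt row (-1-i) (2 * PySem.List.pyGetD row (-1-i) 0)) (-2-i) 0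
  else row

def final_right (grid : List (List Int)) : List (List Int) :=
  let g1 := (PySem.List.pyRange 0 (grid.length : Int) 1).foldl (fun g _ => shift_rightA g) grid
  let g2 := g1.map (fun row => (PySem.List.pyRange 0 ((g1.length : Int) - 1) 1).foldl stepMerge row)
  (PySem.List.pyRange 0 (g2.length : Int) 1).foldl (fun g _ => shift_rightA g) g2

-- ===== PORT B =====
-- the 'while i >= 0' merge loop of Source B (appends to 'merged', moving i down by 1 or 2);
-- ported with a structural counter fuel = i+1 (each iteration lowers i by at least 1, so the
-- counter never runs out while i >= 0 and the recursion is exactly the while loop)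
def bMergeLoop (vals : List Int) : Nat → Int → List Int → List Int
  | 0, _, acc => acc
  | fuel + 1, i, acc =>
    if i ≥ 0 then
      if i > 0 ∧ PySem.List.pyGetD vals i 0 = PySem.List.pyGetD vals (i - 1) 0 then
        bMergeLoop vals fuel (i - 2) (acc ++ [2 * PySem.List.pyGetD vals i 0])
      else
        bMergeLoop vals fuel (i - 1) (acc ++ [PySem.List.pyGetD vals i 0])
    else acc

def final_right_alt (grid : List (List Int)) : List (List Int) :=
  let n := grid.length
  grid.map (fun row =>
    let keep := row.take (max ((row.length : Int) - (n : Int)) 0).toNat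
    let vals := (row.drop keep.length).filter (fun x => x != 0)
    let merged := (bMergeLoop vals vals.length ((vals.length : Int) - 1) []).reverse
    keep ++ List.replicate (n - merged.length) 0 ++ merged)

-- ===== PRECONDITION & SPEC =====
-- Pre_ excludes grids with a row SHORTER than the number of rows: A's negative indexing raises
-- IndexError there, except in the degenerate one-row-of-width-0 case (e.g. [[]]), where A happens
-- to return the grid unchanged (its loop ranges are empty) while B pads the zero-width window.
def Pre_final_right (grid : List (List Int)) : Prop :=
  ∀ row ∈ grid, grid.length ≤ row.length
instance (grid : List (List Int)) : Decidable (Pre_final_right grid) := by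
  unfold Pre_final_right; infer_instance

def pvWitness_final_right : List (List Int) := [[2, 2], [0, 4]]

def Spec_final_right (grid : List (List Int)) (out : List (List Int)) : Prop := out = final_right_alt grid
instance (grid : List (List Int)) (out : List (List Int)) : Decidable (Spec_final_right grid out) := by unfold Spec_final_right; infer_instance

-- ===== CLAIM (what is proved, stated in full; the proofs are below) =====
def Claim_equal_final_right : Prop := ∀ (grid : List (List Int)), Dom_final_right grid → Pre_final_right grid → Spec_final_right grid (final_right grid)

-- ===== LEMMAS AND PROOFS =====

-- The generic one-pair update both of A's inner loops perform, seen on the REVERSED row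
-- (Python position -1-i of the row is position i of the reversed row).
def uS : Int → Int → Int × Int := fun a b => if a = 0 then (b, a) else (a, b)
def uM : Int → Int → Int × Int := fun a b => if a = b then (2 * a, 0) else (a, b)

def touchAt (u : Int → Int → Int × Int) (k : Nat) (s : List Int) : List Int :=
  if k + 1 < s.length then
    (s.set k (u (s.getD k 0) (s.getD (k + 1) 0)).1).set (k + 1) (u (s.getD k 0) (s.getD (k + 1) 0)).2
  else s

-- one inner-loop sweep limited to the first k positions of the reversed row
def Qu (u : Int → Int → Int × Int) : Nat → List Int → List Int
  | 0, r => r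
  | _ + 1, [] => []
  | _ + 1, [x] => [x]
  | k + 1, x :: y :: t => (u x y).1 :: Qu u k ((u x y).2 :: t)

-- an unlimited sweep
def Ru (u : Int → Int → Int × Int) : List Int → List Int
  | [] => []
  | [x] => [x]
  | x :: y :: t => (u x y).1 :: Ru u ((u x y).2 :: t)
termination_by r => r.length
decreasing_by simp

-- greedy pairwise merge of the (reversed, zero-free) row
def G : List Int → List Int
  | [] => []
  | [x] => [x]
  | x :: y :: t => if x = y then 2 * x :: G t else x :: G (y :: t)
termination_by r => r.length
decreasing_by all_goals simp

theorem Ru_cons_cons (u : Int → Int → Int × Int) (x y : Int) (t : List Int) :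
    Ru u (x :: y :: t) = (u x y).1 :: Ru u ((u x y).2 :: t) := by
  rw [Ru.eq_def]

theorem length_Qu (u : Int → Int → Int × Int) : ∀ (k : Nat) (r : List Int), (Qu u k r).length = r.length := by
  intro k
  induction k with
  | zero => intro r; simp [Qu]
  | succ k ih =>
    intro r
    match r with
    | [] => simp [Qu]
    | [x] => simp [Qu]
    | x :: y :: t => simp [Qu, ih]

theorem length_Ru_aux (u : Int → Int → Int × Int) : ∀ (N : Nat) (r : List Int), r.length ≤ N → (Ru u r).length = r.length := by
  intro N
  induction N with
  | zero =>
    intro r h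
    match r with
    | [] => simp [Ru]
    | x :: t => simp at h
  | succ N ih =>
    intro r h
    match r with
    | [] => simp [Ru]
    | [x] => simp [Ru]
    | x :: y :: t =>
      rw [Ru_cons_cons]
      have := ih ((u x y).2 :: t) (by simp at h ⊢; omega)
      simp at this ⊢
      omega

theorem length_Ru (u : Int → Int → Int × Int) (r : List Int) : (Ru u r).length = r.length :=
  length_Ru_aux u r.length r (le_refl _)

theorem Qu_eq_Ru (u : Int → Int → Int × Int) : ∀ (k : Nat) (r : List Int), r.length ≤ k + 1 → Qu u k r = Ru u r := by
  intro k
  induction k with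
  | zero =>
    intro r h
    match r with
    | [] => simp [Qu, Ru]
    | [x] => simp [Qu, Ru]
    | x :: y :: t => simp at h
  | succ k ih =>
    intro r h
    match r with
    | [] => simp [Qu, Ru]
    | [x] => simp [Qu, Ru]
    | x :: y :: t =>
      simp only [Qu]
      rw [Ru_cons_cons]
      congr 1
      apply ih
      simp at h ⊢; omega

theorem touch_cons (u : Int → Int → Int × Int) (k : Nat) (z : Int) (s : List Int) :
    touchAt u (k + 1) (z :: s) = z :: touchAt u k s := by
  simp only [touchAt, List.length_cons]
  by_cases h : k + 1 < s.length
  · simp [h]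
  · simp [h]

theorem Qu_succ (u : Int → Int → Int × Int) : ∀ (k : Nat) (r : List Int), Qu u (k + 1) r = touchAt u k (Qu u k r) := by
  intro k
  induction k with
  | zero =>
    intro r
    match r with
    | [] => simp [Qu, touchAt]
    | [x] => simp [Qu, touchAt]
    | x :: y :: t => simp [Qu, touchAt]
  | succ k ih =>
    intro r
    match r with
    | [] => simp [Qu, touchAt]
    | [x] => simp [Qu, touchAt]
    | x :: y :: t =>
      show (u x y).1 :: Qu u (k + 1) ((u x y).2 :: t) = touchAt u (k + 1) ((u x y).1 :: Qu u k ((u x y).2 :: t))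
      rw [touch_cons, ih]

theorem reverse_set (l : List Int) (k : Nat) (v : Int) (h : k < l.length) :
    (l.set k v).reverse = l.reverse.set (l.length - 1 - k) v := by
  apply List.ext_getElem (by simp)
  intro i h1 h2
  have hi : i < l.length := by simpa using h1
  simp only [List.getElem_reverse, List.getElem_set, List.length_set]
  by_cases hik : k = l.length - 1 - i
  · rw [if_pos hik, if_pos (by omega)]
  · rw [if_neg hik, if_neg (by omega)]

theorem revGetD (s : List Int) (k : Nat) (h : k < s.length) :
    PySem.List.pyGetD s.reverse (-1 - (k : Int)) 0 = s[k] := by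
  have h1 : (-1 - (k : Int)) = -(((k + 1 : Nat)) : Int) := by push_cast; ring
  rw [h1, PySem.List.pyGetD_neg_natCast _ _ _ (by omega) (by simp; omega)]
  rw [List.getElem_reverse]
  congr 1
  simp; omega

theorem revSet (s : List Int) (k : Nat) (v : Int) (h : k < s.length) :
    pySetAt s.reverse (-1 - (k : Int)) v = (s.set k v).reverse := by
  unfold pySetAt
  simp only [List.length_reverse]
  have h1 : (-1 - (k : Int)) < 0 := by omega
  have h2 : ¬ ((-1 - (k : Int)) + (s.length : Int) < 0) := by omega
  simp only [if_pos h1, if_neg h2]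
  rw [reverse_set s k v h]
  congr 1
  omega

theorem stepShift_touch (s : List Int) (k : Nat) (hk : k + 1 < s.length) :
    stepShift s.reverse (k : Int) = (touchAt uS k s).reverse := by
  have hk0 : k < s.length := by omega
  have e2 : (-2 - (k : Int)) = -1 - ((k + 1 : Nat) : Int) := by push_cast; ring
  unfold stepShift touchAt
  rw [e2, revGetD s k hk0, revGetD s (k + 1) hk]
  rw [if_pos hk]
  rw [List.getD_eq_getElem s 0 hk0, List.getD_eq_getElem s 0 hk]
  by_cases h : s[k] = 0
  · rw [if_pos h, revSet s k _ hk0, revSet _ (k + 1) _ (by simp [hk])]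
    simp [uS, h]
  · rw [if_neg h]
    simp [uS, h, List.set_getElem_self]

theorem stepMerge_touch (s : List Int) (k : Nat) (hk : k + 1 < s.length) :
    stepMerge s.reverse (k : Int) = (touchAt uM k s).reverse := by
  have hk0 : k < s.length := by omega
  have e2 : (-2 - (k : Int)) = -1 - ((k + 1 : Nat) : Int) := by push_cast; ring
  unfold stepMerge touchAt
  rw [e2, revGetD s k hk0, revGetD s (k + 1) hk]
  rw [if_pos hk]
  rw [List.getD_eq_getElem s 0 hk0, List.getD_eq_getElem s 0 hk]
  by_cases h : s[k] = s[k + 1]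
  · rw [if_pos h, revSet s k _ hk0, revSet _ (k + 1) _ (by simp [hk])]
    simp [uM, h]
  · rw [if_neg h]
    simp [uM, h, List.set_getElem_self]

theorem fold_touch (u : Int → Int → Int × Int) (step : List Int → Int → List Int)
    (hstep : ∀ (s : List Int) (k : Nat), k + 1 < s.length → step s.reverse (k : Int) = (touchAt u k s).reverse) :
    ∀ (k : Nat) (row : List Int), k < row.length →
      (PySem.List.pyRange 0 (k : Int) 1).foldl step row = (Qu u k row.reverse).reverse := by
  intro k
  induction k with
  | zero =>
    intro row _
    rw [PySem.List.pyRange_one_eq_nil (by omega)]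
    simp [Qu]
  | succ k ih =>
    intro row h
    have hcast : ((k + 1 : Nat) : Int) = (k : Int) + 1 := by push_cast; ring
    rw [hcast, PySem.List.pyRange_one_succ_right (by omega), List.foldl_append]
    rw [ih row (by omega)]
    simp only [List.foldl_cons, List.foldl_nil]
    have := hstep (Qu u k row.reverse) k (by rw [length_Qu]; simp; omega)
    rw [this, Qu_succ]

-- unlimited shift sweep, characterised
theorem Ru_zero : ∀ (l : List Int), Ru uS (0 :: l) = l ++ [0] := by
  intro l
  induction l with
  | nil => simp [Ru]
  | cons y t ih => simp [Ru, uS] at ih ⊢; exact ih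

theorem Ru_cons_nz (x : Int) (hx : x ≠ 0) : ∀ (l : List Int), Ru uS (x :: l) = x :: Ru uS l := by
  intro l
  match l with
  | [] => simp [Ru]
  | y :: t => simp [Ru, uS, hx]

theorem iter_cons_nz (x : Int) (hx : x ≠ 0) : ∀ (m : Nat) (l : List Int),
    (Ru uS)^[m] (x :: l) = x :: (Ru uS)^[m] l := by
  intro m
  induction m with
  | zero => intro l; simp
  | succ m ih =>
    intro l
    rw [Function.iterate_succ_apply, Function.iterate_succ_apply, Ru_cons_nz x hx, ih]

theorem Ru_zeros : ∀ (z : Nat), Ru uS (List.replicate z 0) = List.replicate z 0 := by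
  intro z
  match z with
  | 0 => simp [Ru]
  | z + 1 =>
    rw [List.replicate_succ, Ru_zero, ← List.replicate_succ', List.replicate_succ]

theorem Ru_fix : ∀ (v : List Int) (z : Nat), (∀ a ∈ v, a ≠ 0) →
    Ru uS (v ++ List.replicate z 0) = v ++ List.replicate z 0 := by
  intro v
  induction v with
  | nil => intro z _; simpa using Ru_zeros z
  | cons x t ih =>
    intro z hv
    have hx : x ≠ 0 := hv x (by simp)
    rw [List.cons_append, Ru_cons_nz x hx, ih z (fun a ha => hv a (by simp [ha]))]

theorem compact : ∀ (s : List Int) (j : Nat),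
    (Ru uS)^[s.length] (s ++ List.replicate j 0) =
      s.filter (fun x => x != 0) ++ List.replicate (j + s.length - (s.filter (fun x => x != 0)).length) 0 := by
  intro s
  induction s with
  | nil => intro j; simp
  | cons x t ih =>
    intro j
    have hflen : (t.filter (fun x => x != 0)).length ≤ t.length := List.length_filter_le _ _
    by_cases hx : x = 0
    · subst hx
      rw [List.length_cons, Function.iterate_succ_apply]
      rw [List.cons_append, Ru_zero, List.append_assoc, ← List.replicate_succ']
      rw [ih (j + 1)]
      simp only [List.filter_cons]
      norm_num
      congr 1
      omega
    · rw [List.length_cons, List.cons_append, iter_cons_nz x hx]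
      rw [Function.iterate_succ_apply', ih j]
      rw [Ru_fix _ _ (fun a ha => by simp at ha; exact ha.2)]
      simp only [List.filter_cons]
      have : (x != 0) = true := by simp [hx]
      rw [this]
      simp only [if_true, List.cons_append, List.length_cons]
      rw [show j + (t.length + 1) - ((List.filter (fun x => x != 0) t).length + 1)
            = j + t.length - (List.filter (fun x => x != 0) t).length from by omega]

-- unlimited merge sweep, characterised
theorem RuM_zeros : ∀ (z : Nat), Ru uM (List.replicate z 0) = List.replicate z 0 := by
  intro z
  induction z with
  | zero => simp [Ru]
  | succ z ih =>
    cases z with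
    | zero => simp [Ru, List.replicate]
    | succ z' =>
      rw [List.replicate_succ, List.replicate_succ]
      rw [List.replicate_succ] at ih
      show Ru uM (0 :: 0 :: List.replicate z' 0) = 0 :: 0 :: List.replicate z' 0
      rw [show Ru uM (0 :: 0 :: List.replicate z' 0)
            = 0 :: Ru uM (0 :: List.replicate z' 0) by rw [Ru_cons_cons]; simp [uM]]
      rw [ih]

theorem MG : ∀ (N : Nat) (v : List Int) (z : Nat), v.length ≤ N → (∀ a ∈ v, a ≠ 0) →
    (Ru uM (v ++ List.replicate z 0)).filter (fun x => x != 0) = G v := by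
  intro N
  induction N with
  | zero =>
    intro v z hN _
    have : v = [] := by cases v <;> simp_all
    subst this
    simp [RuM_zeros, G]
  | succ N ih =>
    intro v z hN hv
    match v with
    | [] => simp [RuM_zeros, G]
    | [x] =>
      have hx : x ≠ 0 := hv x (by simp)
      match z with
      | 0 => simp [Ru, G, hx]
      | z + 1 =>
        rw [List.replicate_succ]
        show (Ru uM (x :: 0 :: List.replicate z 0)).filter (fun x => x != 0) = G [x]
        rw [show Ru uM (x :: 0 :: List.replicate z 0)
              = x :: Ru uM (0 :: List.replicate z 0) by rw [Ru_cons_cons]; simp [uM, hx]]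
        rw [← List.replicate_succ, RuM_zeros]
        simp [G, hx]
    | x :: y :: t =>
      have hx : x ≠ 0 := hv x (by simp)
      have hy : y ≠ 0 := hv y (by simp)
      have ht : ∀ a ∈ t, a ≠ 0 := fun a ha => hv a (by simp [ha])
      by_cases hxy : x = y
      · have h2x : (2 * x) ≠ 0 := by omega
        rw [show ((x :: y :: t) ++ List.replicate z 0) = x :: y :: (t ++ List.replicate z 0) by simp]
        rw [show Ru uM (x :: y :: (t ++ List.replicate z 0))
              = 2 * x :: Ru uM (0 :: (t ++ List.replicate z 0)) by rw [Ru_cons_cons]; simp [uM, hxy]]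
        rw [List.filter_cons_of_pos (by simp [h2x])]
        rw [show G (x :: y :: t) = 2 * x :: G t by simp [G, hxy]]
        congr 1
        match t with
        | [] =>
          rw [List.nil_append, ← List.replicate_succ, RuM_zeros]
          simp [G]
        | u :: t' =>
          have hu : u ≠ 0 := ht u (by simp)
          show (Ru uM (0 :: u :: (t' ++ List.replicate z 0))).filter (fun x => x != 0) = G (u :: t')
          rw [show Ru uM (0 :: u :: (t' ++ List.replicate z 0))
                = 0 :: Ru uM (u :: (t' ++ List.replicate z 0)) by
              rw [Ru_cons_cons]; simp [uM, Ne.symm hu]]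
          rw [List.filter_cons_of_neg (by simp)]
          exact ih (u :: t') z (by simp at hN ⊢; omega) ht
      · rw [show ((x :: y :: t) ++ List.replicate z 0) = x :: ((y :: t) ++ List.replicate z 0) by simp]
        rw [show Ru uM (x :: ((y :: t) ++ List.replicate z 0))
              = x :: Ru uM ((y :: t) ++ List.replicate z 0) by
            rw [show ((y :: t) ++ List.replicate z 0) = y :: (t ++ List.replicate z 0) by simp]
            rw [Ru_cons_cons]; simp [uM, hxy]]
        rw [List.filter_cons_of_pos (by simp [hx])]
        rw [show G (x :: y :: t) = x :: G (y :: t) by simp [G, hxy]]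
        congr 1
        exact ih (y :: t) z (by simp at hN ⊢; omega) (fun a ha => hv a (by simp at ha; rcases ha with h | h <;> simp [h]))

-- B's loop computes G of the reversed prefix
theorem BL : ∀ (fuel k : Nat) (vals acc : List Int), k ≤ fuel → k ≤ vals.length →
    bMergeLoop vals fuel ((k : Int) - 1) acc = acc ++ G ((vals.take k).reverse) := by
  intro fuel
  induction fuel with
  | zero =>
    intro k vals acc hN _
    interval_cases k
    simp [bMergeLoop, G]
  | succ N ih =>
    intro k vals acc hN hk
    match k with
    | 0 =>
      show bMergeLoop vals (N + 1) (((0 : Nat) : Int) - 1) acc = _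
      rw [bMergeLoop]
      norm_num [G]
    | 1 =>
      have h0 : 0 < vals.length := by omega
      have hstop : bMergeLoop vals N (-1) (acc ++ [PySem.List.pyGetD vals 0 0])
          = acc ++ [PySem.List.pyGetD vals 0 0] := by
        cases N <;> simp [bMergeLoop]
      rw [bMergeLoop]
      norm_num
      rw [hstop]
      simp [List.take_add_one, PySem.List.pyGetD_zero,
        List.getElem?_eq_getElem h0, G]
    | k' + 2 =>
      have h1 : k' + 1 < vals.length := by omega
      have h0 : k' < vals.length := by omega
      rw [bMergeLoop]
      have e1 : ((k' + 2 : Nat) : Int) - 1 = ((k' + 1 : Nat) : Int) := by push_cast; ring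
      rw [e1]
      have hge : ((k' + 1 : Nat) : Int) ≥ 0 := by positivity
      rw [if_pos hge]
      have e0 : ((k' + 1 : Nat) : Int) - 1 = ((k' : Nat) : Int) := by push_cast; ring
      rw [e0, PySem.List.pyGetD_natCast, PySem.List.pyGetD_natCast]
      rw [List.getD_eq_getElem vals 0 h1, List.getD_eq_getElem vals 0 h0]
      have htake2 : (vals.take (k' + 2)).reverse = vals[k' + 1] :: vals[k'] :: (vals.take k').reverse := by
        rw [List.take_add_one, List.take_add_one]
        simp [List.getElem?_eq_getElem h0, List.getElem?_eq_getElem h1]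
      by_cases heq : vals[k' + 1] = vals[k']
      · have hcond : ((k' + 1 : Nat) : Int) > 0 ∧ vals[k' + 1] = vals[k'] := ⟨by push_cast; omega, heq⟩
        rw [if_pos hcond]
        rw [show ((k' + 1 : Nat) : Int) - 2 = ((k' : Nat) : Int) - 1 from by push_cast; ring]
        rw [ih k' vals _ (by omega) (by omega)]
        rw [htake2, show G (vals[k' + 1] :: vals[k'] :: (vals.take k').reverse)
              = 2 * vals[k' + 1] :: G ((vals.take k').reverse) by simp [G, heq]]
        simp
      · rw [if_neg (by intro hc; exact heq hc.2)]
        rw [show ((k' : Nat) : Int) = ((k' + 1 : Nat) : Int) - 1 from by push_cast; ring]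
        rw [ih (k' + 1) vals _ (by omega) (by omega)]
        have htake1 : (vals.take (k' + 1)).reverse = vals[k'] :: (vals.take k').reverse := by
          rw [List.take_add_one]
          simp [List.getElem?_eq_getElem h0]
        rw [htake2, htake1, show G (vals[k' + 1] :: vals[k'] :: (vals.take k').reverse)
              = vals[k' + 1] :: G (vals[k'] :: (vals.take k').reverse) by simp [G, heq]]
        simp

-- grid-level plumbing
def psi (n : Nat) (row : List Int) : List Int :=
  (PySem.List.pyRange 0 ((n : Int) - 1) 1).foldl stepShift row

def mu (n : Nat) (row : List Int) : List Int :=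
  (PySem.List.pyRange 0 ((n : Int) - 1) 1).foldl stepMerge row

theorem foldl_const_iterate {α β : Type} (f : α → α) : ∀ (l : List β) (x : α),
    l.foldl (fun g _ => f g) x = f^[l.length] x := by
  intro l
  induction l with
  | nil => intro x; simp
  | cons a l ih =>
    intro x
    rw [List.foldl_cons, ih, List.length_cons, Function.iterate_succ_apply]

theorem shift_rightA_eq_map (g : List (List Int)) : shift_rightA g = g.map (psi g.length) := rfl

theorem iter_shift : ∀ (m : Nat) (g : List (List Int)),
    (fun h => shift_rightA h)^[m] g = g.map (psi g.length)^[m] := by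
  intro m
  induction m with
  | zero => intro g; simp
  | succ m ih =>
    intro g
    rw [Function.iterate_succ_apply, ih]
    rw [shift_rightA_eq_map, List.length_map, List.map_map]
    exact congrArg (fun F => g.map F)
      (funext fun row => (Function.iterate_succ_apply (psi g.length) m row).symm)

-- per-row: A's sweeps act on the reversed row, and only on its first n cells (the row's last n)
theorem Qu_append (u : Int → Int → Int × Int) : ∀ (k : Nat) (a b : List Int), k + 1 ≤ a.length →
    Qu u k (a ++ b) = Qu u k a ++ b := by
  intro k
  induction k with
  | zero => intro a b _; simp [Qu]
  | succ k ih =>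
    intro a b h
    match a with
    | [] => simp at h
    | [x] => simp at h
    | x :: y :: t =>
      show Qu u (k + 1) (x :: y :: (t ++ b)) = Qu u (k + 1) (x :: y :: t) ++ b
      simp only [Qu, List.cons_append]
      rw [show (u x y).2 :: (t ++ b) = ((u x y).2 :: t) ++ b from rfl]
      rw [ih _ b (by simp at h ⊢; omega)]

theorem psi_eq (n : Nat) (hn : 1 ≤ n) (a b : List Int) (ha : a.length = n) :
    psi n ((a ++ b).reverse) = (Ru uS a ++ b).reverse := by
  unfold psi
  have e : ((n : Int) - 1) = ((n - 1 : Nat) : Int) := by omega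
  rw [e, fold_touch uS stepShift stepShift_touch (n - 1) _ (by simp [ha]; omega)]
  rw [List.reverse_reverse, Qu_append uS (n - 1) a b (by omega), Qu_eq_Ru uS (n - 1) a (by omega)]

theorem mu_eq (n : Nat) (hn : 1 ≤ n) (a b : List Int) (ha : a.length = n) :
    mu n ((a ++ b).reverse) = (Ru uM a ++ b).reverse := by
  unfold mu
  have e : ((n : Int) - 1) = ((n - 1 : Nat) : Int) := by omega
  rw [e, fold_touch uM stepMerge stepMerge_touch (n - 1) _ (by simp [ha]; omega)]
  rw [List.reverse_reverse, Qu_append uM (n - 1) a b (by omega), Qu_eq_Ru uM (n - 1) a (by omega)]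

theorem psi_iter (n : Nat) (hn : 1 ≤ n) : ∀ (m : Nat) (a b : List Int), a.length = n →
    (psi n)^[m] ((a ++ b).reverse) = ((Ru uS)^[m] a ++ b).reverse := by
  intro m
  induction m with
  | zero => intro a b _; simp
  | succ m ih =>
    intro a b ha
    rw [Function.iterate_succ_apply, psi_eq n hn a b ha]
    rw [ih _ b (by rw [length_Ru]; exact ha)]
    rw [Function.iterate_succ_apply]

-- split a list's reverse at position n (from the right)
theorem rev_take_drop (l : List Int) (n : Nat) (h : n ≤ l.length) :
    l.reverse.take n = (l.drop (l.length - n)).reverse ∧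
      l.reverse.drop n = (l.take (l.length - n)).reverse := by
  have hsplit : l.reverse = (l.drop (l.length - n)).reverse ++ (l.take (l.length - n)).reverse := by
    rw [← List.reverse_append, List.take_append_drop]
  have hlen : (l.drop (l.length - n)).reverse.length = n := by simp; omega
  constructor
  · rw [hsplit, List.take_left' hlen]
  · rw [hsplit, List.drop_left' hlen]

-- the full A row pipeline equals B's row computation, on the window of the last n cells
theorem row_core (n : Nat) (hn : 1 ≤ n) (a b : List Int) (ha : a.length = n) :
    (psi n)^[n] (mu n ((psi n)^[n] ((a ++ b).reverse))) =
      b.reverse ++ (List.replicate (n -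
          ((bMergeLoop (a.reverse.filter (fun x => x != 0)) (a.reverse.filter (fun x => x != 0)).length
            (((a.reverse.filter (fun x => x != 0)).length : Int) - 1) []).reverse).length) 0 ++
        (bMergeLoop (a.reverse.filter (fun x => x != 0)) (a.reverse.filter (fun x => x != 0)).length
          (((a.reverse.filter (fun x => x != 0)).length : Int) - 1) []).reverse) := by
  have hflen : (a.filter (fun x => x != 0)).length ≤ n := by
    rw [← ha]; exact List.length_filter_le _ _
  have hfnz : ∀ x ∈ a.filter (fun x => x != 0), x ≠ 0 := by
    intro x hx; simp at hx; exact hx.2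
  -- stage 1: n shift sweeps fully compact the window (zeros to its back, in reversed view)
  rw [psi_iter n hn n a b ha]
  have hc := compact a 0
  rw [ha] at hc
  simp only [List.replicate_zero, List.append_nil, Nat.zero_add] at hc
  rw [hc]
  -- stage 2: one merge sweep on the compacted window
  have ha2 : (a.filter (fun x => x != 0) ++ List.replicate (n - (a.filter (fun x => x != 0)).length) 0).length = n := by
    simp; omega
  rw [mu_eq n hn _ b ha2]
  -- stage 3: n more shift sweeps compact the merged window
  have ha3 : (Ru uM (a.filter (fun x => x != 0) ++ List.replicate (n - (a.filter (fun x => x != 0)).length) 0)).length = n := by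
    rw [length_Ru]; exact ha2
  rw [psi_iter n hn n _ b ha3]
  have hc2 := compact (Ru uM (a.filter (fun x => x != 0) ++ List.replicate (n - (a.filter (fun x => x != 0)).length) 0)) 0
  rw [ha3] at hc2
  simp only [List.replicate_zero, List.append_nil, Nat.zero_add] at hc2
  rw [hc2, MG (a.filter (fun x => x != 0)).length _ _ (le_refl _) hfnz]
  -- B's side: the single-pass loop computes the same greedy merge of the window's nonzeros
  have hvals : a.reverse.filter (fun x => x != 0) = (a.filter (fun x => x != 0)).reverse := by
    rw [List.filter_reverse]
  rw [hvals]
  rw [BL (a.filter (fun x => x != 0)).reverse.length (a.filter (fun x => x != 0)).reverse.length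
        (a.filter (fun x => x != 0)).reverse [] (le_refl _) (le_refl _)]
  rw [List.take_length, List.reverse_reverse]
  simp [List.reverse_append]

theorem row_eq (n : Nat) (hn : 1 ≤ n) (row : List Int) (h : n ≤ row.length) :
    (psi n)^[n] (mu n ((psi n)^[n] row)) =
      row.take (max ((row.length : Int) - (n : Int)) 0).toNat ++
        (List.replicate (n - ((bMergeLoop ((row.drop (row.take (max ((row.length : Int) - (n : Int)) 0).toNat).length).filter (fun x => x != 0))
            ((row.drop (row.take (max ((row.length : Int) - (n : Int)) 0).toNat).length).filter (fun x => x != 0)).length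
            ((((row.drop (row.take (max ((row.length : Int) - (n : Int)) 0).toNat).length).filter (fun x => x != 0)).length : Int) - 1) []).reverse).length) 0 ++
          (bMergeLoop ((row.drop (row.take (max ((row.length : Int) - (n : Int)) 0).toNat).length).filter (fun x => x != 0))
            ((row.drop (row.take (max ((row.length : Int) - (n : Int)) 0).toNat).length).filter (fun x => x != 0)).length
            ((((row.drop (row.take (max ((row.length : Int) - (n : Int)) 0).toNat).length).filter (fun x => x != 0)).length : Int) - 1) []).reverse) := by
  have hk : (max ((row.length : Int) - (n : Int)) 0).toNat = row.length - n := by omega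
  rw [hk]
  have htk : (row.take (row.length - n)).length = row.length - n := by simp
  rw [htk]
  obtain ⟨h1, h2⟩ := rev_take_drop row n h
  have ha : (row.reverse.take n).length = n := by simp; omega
  have hsplit : row = (row.reverse.take n ++ row.reverse.drop n).reverse := by
    rw [List.take_append_drop, List.reverse_reverse]
  conv_lhs => rw [hsplit]
  rw [row_core n hn _ _ ha]
  rw [h1, h2, List.reverse_reverse, List.reverse_reverse]

theorem fold_shift_iterate (g : List (List Int)) :
    (PySem.List.pyRange 0 (g.length : Int) 1).foldl (fun h _ => shift_rightA h) g
      = g.map (psi g.length)^[g.length] := by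
  rw [foldl_const_iterate, PySem.List.length_pyRange_one]
  simp only [Int.sub_zero, Int.toNat_natCast]
  exact iter_shift g.length g

-- ===== VERDICT (by name: the statement is the Claim_ definition above) =====
theorem final_right_spec : Claim_equal_final_right := by
  unfold Claim_equal_final_right Spec_final_right
  intro grid _ hpre
  unfold Pre_final_right at hpre
  show final_right grid = final_right_alt grid
  simp only [final_right, final_right_alt]
  rw [fold_shift_iterate, fold_shift_iterate]
  simp only [List.length_map, List.map_map]
  apply List.map_congr_left
  intro row hrow
  have hn1 : 1 ≤ grid.length := by
    cases grid with
    | nil => simp at hrow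
    | cons a l => simp
  have hr : grid.length ≤ row.length := hpre row hrow
  simpa using row_eq grid.length hn1 row hr
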